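-- pv_equiv track=rewrite | github.com/LNQuynh1009/Python---PTIT | Kiem tra so dep.py | check
-- ===== SOURCE A (Python) =====
-- def check(n):
--     for i in range(0, len(n) - 2):
--         if n[i] != n[i+2]:
--             return False
--     dic = []
--     for i in n:
--         if i not in dic:
--             dic.append(i)
--     return len(dic) == 2
-- ===== SOURCE B (Python) =====
-- def check(n):
--     # exactly two distinct chars, and n is the period-2 pattern built from its first two chars
--     return len(set(n)) == 2 and n == (n[:2] * len(n))[:len(n)]
-- ===== Notes on version B (the rewrite author's own statement) =====
-- stated objective: simpler
-- what changed: Replaces the index-pair scan n[i]==n[i+2] and the hand-built dedup list by a one-line check: len(set(n)) == 2 plus comparing n with the canonical period-2 pattern (n[:2]*len(n))[:len(n)] reconstructed from its first two characters.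
import Mathlib
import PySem

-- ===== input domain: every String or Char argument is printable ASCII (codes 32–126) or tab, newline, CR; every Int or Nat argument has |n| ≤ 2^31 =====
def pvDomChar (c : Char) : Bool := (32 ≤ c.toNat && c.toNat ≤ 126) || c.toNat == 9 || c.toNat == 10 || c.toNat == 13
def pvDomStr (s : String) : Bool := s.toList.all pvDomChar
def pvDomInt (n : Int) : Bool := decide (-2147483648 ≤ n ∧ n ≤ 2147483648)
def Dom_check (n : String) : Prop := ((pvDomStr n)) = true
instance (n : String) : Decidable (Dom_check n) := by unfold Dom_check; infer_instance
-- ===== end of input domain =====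

-- B replaces A's index-pair scan and hand-built dedup list by 'two distinct chars' plus
-- comparing n with the period-2 pattern rebuilt from its first two characters (objective: simpler).

-- ===== PORT A =====
-- early-return loop 'for i in range(0, len(n) - 2): if n[i] != n[i+2]: return False'
def checkPairs (l : List Char) : List Int → Option Bool
  | [] => none
  | i :: rest =>
    if PySem.List.pyGet? l i ≠ PySem.List.pyGet? l (i + 2) then some false
    else checkPairs l rest

def check (n : String) : Bool :=
  let l := n.toList
  match checkPairs l (PySem.List.pyRange 0 ((l.length : Int) - 2) 1) with
  | some b => b
  | none =>
    -- dic = []; for i in n: if i not in dic: dic.append(i)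
    let dic := l.foldl (fun dic i => if i ∈ dic then dic else dic ++ [i]) ([] : List Char)
    dic.length == 2

-- ===== PORT B =====
-- return len(set(n)) == 2 and n == (n[:2] * len(n))[:len(n)]
-- (n[:2] = l.take 2, exact per PySem.List.slice_to; string repetition/truncation via flatten/take)
def check_alt (n : String) : Bool :=
  let l := n.toList
  (PySem.Set.ofList l).length == 2 &&
    l == (List.replicate l.length (l.take 2)).flatten.take l.length

-- ===== PRECONDITION & SPEC =====
def Spec_check (n : String) (out : Bool) : Prop := out = check_alt n
instance (n : String) (out : Bool) : Decidable (Spec_check n out) := by unfold Spec_check; infer_instance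

-- ===== CLAIM (what is proved, stated in full; the proofs are below) =====
def Claim_equal_check : Prop := ∀ (n : String), Dom_check n → Spec_check n (check n)

-- ===== LEMMAS AND PROOFS =====

/-- 'every index pair agrees', the property A's first loop checks. -/
def Period2 (l : List Char) : Prop := ∀ i, (h : i + 2 < l.length) → l[i]'(by omega) = l[i + 2]'h

theorem checkPairs_none_iff (l : List Char) (is : List Int) :
    checkPairs l is = none ↔ ∀ i ∈ is, PySem.List.pyGet? l i = PySem.List.pyGet? l (i + 2) := by
  induction is with
  | nil => simp [checkPairs]
  | cons i rest ih =>
    simp only [checkPairs]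
    split_ifs with h
    · simp [h]
    · simp only [List.mem_cons, ih]
      constructor
      · intro hr j hj
        rcases hj with rfl | hj
        · exact not_not.mp h
        · exact hr j hj
      · intro hall j hj; exact hall j (Or.inr hj)

theorem checkPairs_cases (l : List Char) (is : List Int) :
    checkPairs l is = none ∨ checkPairs l is = some false := by
  induction is with
  | nil => left; rfl
  | cons i rest ih =>
    simp only [checkPairs]
    split_ifs
    · right; rfl
    · exact ih

theorem range_iff_period2 (l : List Char) :
    (∀ i ∈ PySem.List.pyRange 0 ((l.length : Int) - 2) 1,
        PySem.List.pyGet? l i = PySem.List.pyGet? l (i + 2)) ↔ Period2 l := by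
  constructor
  · intro h i hi
    have hmem : (i : Int) ∈ PySem.List.pyRange 0 ((l.length : Int) - 2) 1 := by
      rw [PySem.List.mem_pyRange_one]; constructor <;> [positivity; omega]
    have := h i hmem
    have h2 : ((i : Int) + 2) = ((i + 2 : Nat) : Int) := by push_cast; ring
    rw [h2, PySem.List.pyGet?_natCast, PySem.List.pyGet?_natCast,
        List.getElem?_eq_getElem (by omega), List.getElem?_eq_getElem hi] at this
    exact Option.some.inj this
  · intro h i hi
    rw [PySem.List.mem_pyRange_one] at hi
    obtain ⟨h0, h1⟩ := hi
    obtain ⟨k, rfl⟩ : ∃ k : Nat, (i : Int) = k := ⟨i.toNat, (Int.toNat_of_nonneg h0).symm⟩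
    have hk : k + 2 < l.length := by omega
    have h2 : ((k : Int) + 2) = ((k + 2 : Nat) : Int) := by push_cast; ring
    rw [h2, PySem.List.pyGet?_natCast, PySem.List.pyGet?_natCast,
        List.getElem?_eq_getElem (by omega), List.getElem?_eq_getElem hk]
    exact congrArg some (h k hk)

/-- the canonical alternating word of length k starting a, b. -/
def pat (a b : Char) : Nat → List Char
  | 0 => []
  | k + 1 => a :: pat b a k

@[simp] theorem pat_length (a b : Char) (k : Nat) : (pat a b k).length = k := by
  induction k generalizing a b with
  | zero => rfl
  | succ k ih => simp [pat, ih]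

theorem pat_getElem (a b : Char) (k i : Nat) (h : i < k) :
    (pat a b k)[i]'(by simpa using h) = if i % 2 = 0 then a else b := by
  induction k generalizing a b i with
  | zero => omega
  | succ k ih =>
    cases i with
    | zero => simp [pat]
    | succ i =>
      simp only [pat, List.getElem_cons_succ]
      rw [ih b a i (by omega)]
      rcases Nat.even_or_odd i with he | ho
      · have h1 : i % 2 = 0 := Nat.even_iff.mp he
        have h2 : (i + 1) % 2 = 1 := by omega
        simp [h1, h2]
      · have h1 : i % 2 = 1 := Nat.odd_iff.mp ho
        have h2 : (i + 1) % 2 = 0 := by omega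
        simp [h1, h2]

theorem take_flatten_replicate (a b : Char) (m : Nat) :
    ∀ k, k ≤ 2 * m → ((List.replicate m [a, b]).flatten).take k = pat a b k := by
  induction m with
  | zero => intro k hk; interval_cases k; rfl
  | succ m ih =>
    intro k hk
    have hfl : (List.replicate (m + 1) [a, b]).flatten
        = a :: b :: (List.replicate m [a, b]).flatten := by
      simp [List.replicate_succ]
    rw [hfl]
    match k with
    | 0 => rfl
    | 1 => rfl
    | j + 2 =>
      simp only [List.take_succ_cons]
      rw [ih j (by omega)]
      rfl

theorem eq_pat_iff (l : List Char) (a b : Char) :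
    l = pat a b l.length ↔ ∀ i, (h : i < l.length) → l[i] = if i % 2 = 0 then a else b := by
  constructor
  · intro he i h
    conv_lhs => rw [List.getElem_of_eq he]
    exact pat_getElem a b l.length i h
  · intro h
    apply List.ext_getElem (by simp)
    intro i h1 h2
    rw [h i h1, pat_getElem a b l.length i h1]

theorem period2_mod (l : List Char) (hp : Period2 l) :
    ∀ i, (h : i < l.length) → l[i] = l[i % 2]'(by omega) := by
  intro i
  induction i using Nat.strong_induction_on with
  | _ i ih =>
    intro h
    match i with
    | 0 => rfl
    | 1 => rfl
    | j + 2 =>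
      have h1 : l[j]'(by omega) = l[j + 2]'h := hp j h
      have h2 : (j + 2) % 2 = j % 2 := by omega
      rw [← h1, ih j (by omega) (by omega)]
      congr 1
      omega

theorem period2_iff_forall (a b : Char) (t : List Char) :
    Period2 (a :: b :: t) ↔
      ∀ i, (h : i < (a :: b :: t).length) →
        (a :: b :: t)[i] = if i % 2 = 0 then a else b := by
  constructor
  · intro hp i h
    rw [period2_mod _ hp i h]
    have : i % 2 = 0 ∨ i % 2 = 1 := by omega
    rcases this with h2 | h2 <;> simp [h2]
  · intro hf i h
    have hi := hf i (by simp at h ⊢; omega)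
    have hi2 := hf (i + 2) h
    rw [hi, hi2]
    have : (i + 2) % 2 = i % 2 := by omega
    rw [this]

/-- B's pattern comparison is exactly the property A's pair loop checks. -/
theorem pattern_iff_period2 (l : List Char) :
    l = (List.replicate l.length (l.take 2)).flatten.take l.length ↔ Period2 l := by
  match l with
  | [] => simp [Period2]
  | [a] =>
    constructor
    · intro _ i h; simp at h
    · intro _; rfl
  | a :: b :: t =>
    have ht : (a :: b :: t).take 2 = [a, b] := rfl
    rw [ht, take_flatten_replicate a b (a :: b :: t).length (a :: b :: t).length (by omega),
        eq_pat_iff, period2_iff_forall]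

theorem dic_fold_eq_ofList (l : List Char) :
    l.foldl (fun dic i => if i ∈ dic then dic else dic ++ [i]) ([] : List Char)
      = PySem.Set.ofList l := by
  rw [PySem.Set.ofList_eq_foldl]
  congr 1
  funext s x
  rw [PySem.Set.add_eq_ite]

-- ===== VERDICT (by name: the statement is the Claim_ definition above) =====
theorem check_spec : Claim_equal_check := by
  intro n _
  unfold Spec_check check check_alt
  set l := n.toList with hl
  rcases checkPairs_cases l (PySem.List.pyRange 0 ((l.length : Int) - 2) 1) with hc | hc
  · -- loop finished: Period2 holds, pattern comparison is true
    have hp : Period2 l := (range_iff_period2 l).mp ((checkPairs_none_iff l _).mp hc)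
    have hpat : l = (List.replicate l.length (l.take 2)).flatten.take l.length :=
      (pattern_iff_period2 l).mpr hp
    simp only [hc, dic_fold_eq_ofList, ← hpat, BEq.rfl, Bool.and_true]
  · -- loop returned False: pattern comparison is false, both sides are false
    have hnp : ¬ Period2 l := by
      intro hp
      rw [(checkPairs_none_iff l _).mpr ((range_iff_period2 l).mpr hp)] at hc
      simp at hc
    have hpat : l ≠ (List.replicate l.length (l.take 2)).flatten.take l.length := fun h =>
      hnp ((pattern_iff_period2 l).mp h)
    simp only [hc, beq_eq_false_iff_ne.mpr hpat, Bool.and_false]
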